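-- pv_equiv track=rewrite | github.com/yingzhuo1994/LeetCode | 0089_GrayCode.py | removeOne
-- ===== SOURCE A (Python) =====
-- def removeOne(num):
--     d = num
--     lst = []
--     while d > 0:
--         last = ((d - 1) & d) ^ d
--         lst.append(num ^ last)
--         d ^= last
--     return lst
-- ===== SOURCE B (Python) =====
-- def removeOne(num):
--     lst = []
--     d = num
--     i = 0
--     while d > 0:
--         if d & 1:
--             lst.append(num ^ (1 << i))
--         d >>= 1
--         i += 1
--     return lst
-- ===== Notes on version B (the rewrite author's own statement) =====
-- stated objective: alternative
-- what changed: B scans every bit position with a shift-and-test loop (d>>=1, counter i) instead of A's repeated lowest-set-bit extraction via (d-1)&d trickery.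
import Mathlib
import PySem

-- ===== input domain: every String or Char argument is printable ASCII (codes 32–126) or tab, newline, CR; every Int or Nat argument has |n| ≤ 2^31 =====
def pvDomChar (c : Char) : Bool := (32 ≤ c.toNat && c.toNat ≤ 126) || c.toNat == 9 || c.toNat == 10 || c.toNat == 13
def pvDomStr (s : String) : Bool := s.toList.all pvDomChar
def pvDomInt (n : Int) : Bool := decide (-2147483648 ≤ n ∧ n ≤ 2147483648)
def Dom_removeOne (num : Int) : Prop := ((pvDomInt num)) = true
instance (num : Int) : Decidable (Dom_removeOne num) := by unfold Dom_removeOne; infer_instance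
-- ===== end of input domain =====

-- B replaces A's repeated lowest-set-bit extraction by a plain shift-and-test scan of the bit
-- positions (alternative decomposition, same cost). In both ports the loop variable d is carried
-- as a Nat: the Python loops run only while d > 0, so d is nonnegative throughout, and a num ≤ 0
-- gives d.toNat = 0 and the empty list exactly as in Python.

-- ===== PORT A =====
def removeOneLoop (num : Int) (d : Nat) : List Int :=
  if h : 0 < d then
    let last := ((d - 1) &&& d) ^^^ d
    (PySem.Int.bxor num (last : Int)) :: removeOneLoop num (d ^^^ last)
  else []
  decreasing_by
    have he : d ^^^ (((d - 1) &&& d) ^^^ d) = (d - 1) &&& d := by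
      rw [Nat.xor_comm ((d - 1) &&& d) d, ← Nat.xor_assoc, Nat.xor_self, Nat.zero_xor]
    have hle : (d - 1) &&& d ≤ d - 1 := Nat.and_le_left
    simp only [he]; omega

def removeOne (num : Int) : List Int := removeOneLoop num num.toNat

-- ===== PORT B =====
def removeOneAltLoop (num : Int) (d : Nat) (i : Nat) : List Int :=
  if 0 < d then
    (if d &&& 1 = 1 then [PySem.Int.bxor num ((1 <<< i : Nat) : Int)] else []) ++
      removeOneAltLoop num (d >>> 1) (i + 1)
  else []
  decreasing_by
    simp only [Nat.shiftRight_succ, Nat.shiftRight_zero]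
    omega

def removeOne_alt (num : Int) : List Int := removeOneAltLoop num num.toNat 0

-- ===== PRECONDITION & SPEC =====
def Spec_removeOne (num : Int) (out : List Int) : Prop := out = removeOne_alt num
instance (num : Int) (out : List Int) : Decidable (Spec_removeOne num out) := by unfold Spec_removeOne; infer_instance

-- ===== CLAIM (what is proved, stated in full; the proofs are below) =====
def Claim_equal_removeOne : Prop := ∀ (num : Int), Dom_removeOne num → Spec_removeOne num (removeOne num)

-- ===== LEMMAS AND PROOFS =====

-- The list of "last" values (lowest set bits) A extracts from d, in extraction order.
def lowBits (d : Nat) : List Nat :=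
  if h : 0 < d then
    let last := ((d - 1) &&& d) ^^^ d
    last :: lowBits (d ^^^ last)
  else []
  decreasing_by
    have he : d ^^^ (((d - 1) &&& d) ^^^ d) = (d - 1) &&& d := by
      rw [Nat.xor_comm ((d - 1) &&& d) d, ← Nat.xor_assoc, Nat.xor_self, Nat.zero_xor]
    have hle : (d - 1) &&& d ≤ d - 1 := Nat.and_le_left
    simp only [he]; omega

theorem xor_cancel_left (x d : Nat) : d ^^^ (x ^^^ d) = x := by
  rw [Nat.xor_comm x d, ← Nat.xor_assoc, Nat.xor_self, Nat.zero_xor]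

theorem removeOneLoop_eq_map (num : Int) (d : Nat) :
    removeOneLoop num d = (lowBits d).map (fun (l : Nat) => PySem.Int.bxor num (l : Int)) := by
  induction d using Nat.strong_induction_on with
  | _ d ih =>
    rw [removeOneLoop, lowBits]
    by_cases h : 0 < d
    · simp only [h, dif_pos, List.map_cons]
      congr 1
      apply ih
      have he : d ^^^ (((d - 1) &&& d) ^^^ d) = (d - 1) &&& d := xor_cancel_left _ _
      have hle : (d - 1) &&& d ≤ d - 1 := Nat.and_le_left
      simp only [he]; omega
    · simp [h]

theorem last_odd (k : Nat) : ((2 * k + 1 - 1) &&& (2 * k + 1)) ^^^ (2 * k + 1) = 1 := by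
  have h1 : (2 * k) &&& (2 * k + 1) = 2 * k := by
    apply Nat.eq_of_testBit_eq
    intro i
    cases i with
    | zero =>
        simp [Nat.testBit_and, Nat.testBit_zero, Nat.mul_mod_right]
    | succ j =>
        simp only [Nat.testBit_succ, Nat.and_div_two,
          show (2 * k + 1) / 2 = k from by omega, show (2 * k) / 2 = k from by omega,
          Nat.and_self]
  have h0 : 2 * k + 1 - 1 = 2 * k := by omega
  rw [h0, h1]
  apply Nat.eq_of_testBit_eq
  intro i
  cases i with
  | zero =>
      simp [Nat.testBit_xor, Nat.testBit_zero, Nat.mul_mod_right, Nat.mul_add_mod]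
  | succ j =>
      simp only [Nat.testBit_succ, Nat.xor_div_two,
        show (2 * k + 1) / 2 = k from by omega, show (2 * k) / 2 = k from by omega,
        show (1 : Nat) / 2 = 0 from by omega, Nat.xor_self, Nat.zero_testBit]

theorem double_xor (a b : Nat) : (2 * a) ^^^ (2 * b) = 2 * (a ^^^ b) := by
  apply Nat.eq_of_testBit_eq
  intro i
  cases i with
  | zero =>
      simp [Nat.testBit_xor, Nat.testBit_zero, Nat.mul_mod_right]
  | succ j =>
      simp only [Nat.testBit_succ, Nat.xor_div_two,
        show (2 * a) / 2 = a from by omega, show (2 * b) / 2 = b from by omega,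
        show (2 * (a ^^^ b)) / 2 = a ^^^ b from by omega]

theorem last_even (k : Nat) (hk : 0 < k) :
    ((2 * k - 1) &&& (2 * k)) ^^^ (2 * k) = 2 * (((k - 1) &&& k) ^^^ k) := by
  have h1 : (2 * k - 1) &&& (2 * k) = 2 * ((k - 1) &&& k) := by
    apply Nat.eq_of_testBit_eq
    intro i
    cases i with
    | zero =>
        simp only [Nat.testBit_and, Nat.testBit_zero]
        simp [show (2 * k) % 2 = 0 from by omega]
    | succ j =>
        simp only [Nat.testBit_succ, Nat.and_div_two,
          show (2 * k - 1) / 2 = k - 1 from by omega, show (2 * k) / 2 = k from by omega,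
          show (2 * ((k - 1) &&& k)) / 2 = (k - 1) &&& k from by omega]
  rw [h1, double_xor]

theorem lowBits_double (d : Nat) : lowBits (2 * d) = (lowBits d).map (2 * ·) := by
  induction d using Nat.strong_induction_on with
  | _ d ih =>
    rw [lowBits, lowBits]
    by_cases h : 0 < d
    · have h2 : 0 < 2 * d := by omega
      simp only [h, h2, dif_pos, List.map_cons]
      rw [last_even d h]
      congr 1
      rw [double_xor]
      apply ih
      have he : d ^^^ (((d - 1) &&& d) ^^^ d) = (d - 1) &&& d := xor_cancel_left _ _
      have hle : (d - 1) &&& d ≤ d - 1 := Nat.and_le_left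
      simp only [he]; omega
    · have : d = 0 := by omega
      simp [this]

theorem two_mul_xor_one (k : Nat) : (2 * k + 1) ^^^ 1 = 2 * k := by
  apply Nat.eq_of_testBit_eq
  intro i
  cases i with
  | zero =>
      simp [Nat.testBit_xor, Nat.testBit_zero, Nat.mul_mod_right, Nat.mul_add_mod]
      omega
  | succ j =>
      simp only [Nat.testBit_succ, Nat.xor_div_two,
        show (2 * k + 1) / 2 = k from by omega, show (2 * k) / 2 = k from by omega,
        show (1 : Nat) / 2 = 0 from by omega, Nat.xor_zero]

theorem lowBits_odd (k : Nat) : lowBits (2 * k + 1) = 1 :: (lowBits k).map (2 * ·) := by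
  rw [lowBits]
  have h : 0 < 2 * k + 1 := by omega
  simp only [h, dif_pos]
  rw [last_odd]
  congr 1
  rw [two_mul_xor_one, lowBits_double]

theorem removeOneAltLoop_eq_map (num : Int) (d : Nat) : ∀ i,
    removeOneAltLoop num d i =
      (lowBits d).map (fun (l : Nat) => PySem.Int.bxor num ((l <<< i : Nat) : Int)) := by
  induction d using Nat.strong_induction_on with
  | _ d ih =>
    intro i
    rw [removeOneAltLoop]
    by_cases h : 0 < d
    · simp only [h, if_pos]
      have hd2 : d >>> 1 = d / 2 := by
        simp [Nat.shiftRight_succ, Nat.shiftRight_zero]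
      have hand : d &&& 1 = d % 2 := Nat.and_one_is_mod d
      rcases Nat.even_or_odd d with ⟨k, hk⟩ | ⟨k, hk⟩
      · -- d = 2k with k > 0
        have hk2 : d / 2 = k := by omega
        rw [hand, hd2, hk2, if_neg (by omega : ¬ d % 2 = 1), List.nil_append]
        rw [ih k (by omega) (i + 1)]
        rw [show d = 2 * k from by omega, lowBits_double, List.map_map]
        apply List.map_congr_left
        intro l _
        simp only [Function.comp_apply, Nat.shiftLeft_eq, Nat.pow_succ]
        congr 1
        push_cast
        ring
      · -- d = 2k + 1
        have hk2 : d / 2 = k := by omega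
        rw [hand, hd2, hk2, if_pos (by omega : d % 2 = 1)]
        rw [ih k (by omega) (i + 1)]
        rw [show d = 2 * k + 1 from by omega, lowBits_odd, List.map_cons, List.map_map]
        simp only [List.singleton_append]
        congr 1
    · have h0 : d = 0 := by omega
      rw [if_neg h, h0, lowBits]
      simp

-- ===== VERDICT (by name: the statement is the Claim_ definition above) =====
theorem removeOne_spec : Claim_equal_removeOne := by
  intro num _
  unfold Spec_removeOne removeOne removeOne_alt
  rw [removeOneLoop_eq_map, removeOneAltLoop_eq_map]
  apply List.map_congr_left
  intro l _
  rw [Nat.shiftLeft_zero]
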